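-- pv_equiv track=rewrite | github.com/mrespino/AOC_2025 | python/dec_06/dec_06.py | try_squid_math
-- ===== SOURCE A (Python) =====
-- def try_squid_math(lines):
--     # strip newlines and empty lines
--     lines = [line.rstrip("\n") for line in lines]
--     lines = [line for line in lines if line.strip()]
--     # last line should be operations
--     ops = lines[-1]
--     # everything else should be numbers
--     nums = lines[:-1]
--     cols = list(zip(*nums, ops))
--     problem_ranges = []
--     # this is a problem range if any column has non-space digits
--     # this is also bulshit!
--     in_problem = False
--     start = None
--     for i, col in enumerate(cols):
--         if all(c == ' ' for c in col):
--             if in_problem: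
--                 problem_ranges.append((start, i))
--                 in_problem = False
--                 start = None
--         else:
--             if not in_problem:
--                 in_problem = True
--                 start = i
--     if in_problem:
--         problem_ranges.append((start, len(cols)))
--     answers = []
--     for start, end in problem_ranges:
--         op = ''.join(ops[start:end]).strip()
--         # For each problem, for each number, collect one digit from each column (right to left) FML!!!!!
--         num_digits = [[] for _ in range(end - start)]
--         for col in range(end - 1, start - 1, -1):
--             for row_idx in range(len(nums)):
--                 digit = nums[row_idx][col]
--                 if digit != ' ':
--                     # please work this time
--                     num_digits[end - 1 - col].append(digit)
--         numbers = []
--         for digits in num_digits: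
--             if digits:
--                 num_str = ''.join(digits)
--                 numbers.append(int(num_str))
--         if op == '+':
--             answers.append(sum(numbers))
--         elif op == '*':
--             prod = 1
--             for n in numbers:
--                 prod *= n
--             answers.append(prod)
--         else:
--             raise ValueError(f"somethings wrong again: {op}")
--     return sum(answers)
-- ===== SOURCE B (Python) =====
-- def try_squid_math(lines):
--     lines = [line.rstrip("\n") for line in lines]
--     lines = [line for line in lines if line.strip()]
--     ops = lines[-1]
--     nums = lines[:-1]
--     # zip(*nums, ops) truncation width
--     width = len(ops)
--     for row in nums:
--         width = min(width, len(row))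
--     # one row-major scan: per-column digit strings, rows top to bottom
--     digits = {}
--     for row in nums:
--         for j, ch in enumerate(row[:width]):
--             if ch != ' ':
--                 digits[j] = digits.get(j, '') + ch
--     # one fused left-to-right pass over column positions (sentinel at width flushes)
--     total = 0
--     run_nums = None
--     run_op = ''
--     for j in range(width + 1):
--         if j == width or (ops[j] == ' ' and j not in digits):
--             if run_nums is not None:
--                 op = run_op.strip()
--                 if op == '+':
--                     total += sum(run_nums)
--                 elif op == '*':
--                     p = 1
--                     for n in run_nums:
--                         p *= n
--                     total += p
--                 else:
--                     raise ValueError(f"somethings wrong again: {op}")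
--                 run_nums = None
--                 run_op = ''
--         else:
--             if run_nums is None:
--                 run_nums = []
--             run_op += ops[j]
--             if j in digits:
--                 run_nums.append(int(digits[j]))
--     return total
-- ===== Notes on version B (the rewrite author's own statement) =====
-- stated objective: alternative
-- what changed: B never transposes and never builds column tuples or problem ranges: one row-major scan accumulates a per-column digit-string dict, then a single fused left-to-right pass over column positions (with a sentinel flush) computes the total with a running accumulator, whereas A transposes, runs a state machine recording (start,end) ranges and then re-scans rows right-to-left per range into a positional scatter array.
import Mathlib
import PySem

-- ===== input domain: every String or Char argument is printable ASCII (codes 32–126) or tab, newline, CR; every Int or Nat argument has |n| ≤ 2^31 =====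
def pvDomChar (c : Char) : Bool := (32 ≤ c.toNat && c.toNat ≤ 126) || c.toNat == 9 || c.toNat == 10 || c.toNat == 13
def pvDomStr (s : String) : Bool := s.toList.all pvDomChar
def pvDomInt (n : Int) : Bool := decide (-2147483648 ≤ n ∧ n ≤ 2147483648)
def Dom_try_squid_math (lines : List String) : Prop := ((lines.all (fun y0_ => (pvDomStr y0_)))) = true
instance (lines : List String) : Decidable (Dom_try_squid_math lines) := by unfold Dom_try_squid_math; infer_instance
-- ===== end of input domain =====

-- B drops A's transpose/column-tuples and range lists: one row-major scan builds a
-- per-column digit-string dict, then a single fused left-to-right pass over column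
-- positions computes the total with a running accumulator (alternative decomposition,
-- same asymptotic cost).


-- ===== PORT A =====
-- shared preamble of both Pythons: strip trailing '\n', drop blank lines.
-- pvRstripNl is exact for line.rstrip("\n") ('\n' stripped from the right only)
def pvRstripNl (s : List Char) : List Char := (s.reverse.dropWhile (fun c => c == '\n')).reverse

def pvLines (lines : List String) : List (List Char) :=
  (lines.map (fun l => pvRstripNl l.toList)).filter (fun l => !(PySem.Chars.strip l).isEmpty)

-- zip(*nums, ops) truncates to the shortest of the rows and ops
def pvWidth (nums : List (List Char)) (ops : List Char) : Nat :=
  (nums.map List.length).foldl min ops.length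

-- column i of zip(*nums, ops); every index i < pvWidth is in range for every row, so getD is exact
def pvCols (nums : List (List Char)) (ops : List Char) : List (List Char) :=
  (List.range (pvWidth nums ops)).map
    (fun i => nums.map (fun r => r.getD i ' ') ++ [ops.getD i ' '])

def pvBlank (col : List Char) : Bool := col.all (fun c => c == ' ')

-- the loop body of A's in_problem / start / problem_ranges state machine
def pvStep (st : Bool × Int × List (Int × Int)) (p : Int × List Char) :
    Bool × Int × List (Int × Int) :=
  if pvBlank p.2 then
    if st.1 then (false, 0, st.2.2 ++ [(st.2.1, p.1)]) else st
  else
    if !st.1 then (true, p.1, st.2.2) else st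

-- A's num_digits array for one problem range [s, e): scatter loop, right to left
def pvDigitsArr (nums : List (List Char)) (s e : Int) : List (List Char) :=
  (PySem.List.pyRange (e - 1) (s - 1) (-1)).foldl
    (fun nd col =>
      nums.foldl
        (fun nd row =>
          if PySem.List.pyGetD row col ' ' != ' ' then
            nd.modify (e - 1 - col).toNat (fun l => l ++ [PySem.List.pyGetD row col ' '])
          else nd)
        nd)
    (List.replicate (e - s).toNat [])

-- A's numbers: join each non-empty digit list and int() it (int() never fails inside Pre_)
def pvNumbersA (nd : List (List Char)) : List Int :=
  nd.foldl
    (fun ns digits =>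
      if !digits.isEmpty then ns ++ [(PySem.Int.ofChars? digits).getD 0] else ns) []

def try_squid_math (lines : List String) : Int :=
  let lns := pvLines lines
  match lns.getLast? with
  | none => 0  -- lines[-1] raises IndexError here: outside Pre_
  | some ops =>
    let nums := lns.dropLast
    let cols := pvCols nums ops
    let st := (PySem.List.enumerate cols).foldl pvStep (false, 0, [])
    let ranges := if st.1 then st.2.2 ++ [(st.2.1, (cols.length : Int))] else st.2.2
    let answers := ranges.foldl
      (fun acc se =>
        let op := PySem.Chars.strip (PySem.List.slice ops (some se.1) (some se.2))
        let numbers := pvNumbersA (pvDigitsArr nums se.1 se.2)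
        if op == ['+'] then acc ++ [numbers.sum]
        else if op == ['*'] then acc ++ [numbers.foldl (fun p n => p * n) 1]
        else acc)  -- raise ValueError: outside Pre_
      ([] : List Int)
    answers.sum

-- ===== PORT B =====
-- width = len(ops); for row in nums: width = min(width, len(row))
def pvWidthB (nums : List (List Char)) (ops : List Char) : Nat :=
  nums.foldl (fun w r => min w r.length) ops.length

-- one row-major scan: digits[j] = digits.get(j, '') + ch for every non-space ch
def pvDigitsB (nums : List (List Char)) (width : Nat) : PySem.Dict Int (List Char) :=
  nums.foldl
    (fun d row =>
      (PySem.List.enumerate (row.take width)).foldl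
        (fun d p => if p.2 != ' ' then d.insert p.1 (d.getD p.1 [] ++ [p.2]) else d) d)
    PySem.Dict.empty

-- one iteration of B's fused pass: state = (total, run_nums (None = not in a run), run_op)
def pvStepB (ops : List Char) (width : Nat) (digits : PySem.Dict Int (List Char))
    (st : Int × Option (List Int) × List Char) (j : Int) : Int × Option (List Int) × List Char :=
  if j == (width : Int) || (PySem.List.pyGetD ops j ' ' == ' ' && !(digits.contains j)) then
    match st.2.1 with
    | none => st
    | some ns =>
      let op := PySem.Chars.strip st.2.2
      if op == ['+'] then (st.1 + ns.sum, none, [])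
      else if op == ['*'] then (st.1 + ns.foldl (fun p n => p * n) 1, none, [])
      else (st.1, none, [])  -- raise ValueError: outside Pre_
  else
    let ns0 := (st.2.1).getD []
    let ns := if digits.contains j then ns0 ++ [(PySem.Int.ofChars? (digits.getD j [])).getD 0]
              else ns0
    (st.1, some ns, st.2.2 ++ [PySem.List.pyGetD ops j ' '])

def try_squid_math_alt (lines : List String) : Int :=
  let lns := pvLines lines
  match lns.getLast? with
  | none => 0  -- lines[-1] raises IndexError here: outside Pre_
  | some ops =>
    let nums := lns.dropLast
    let width := pvWidthB nums ops
    let digits := pvDigitsB nums width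
    ((PySem.List.pyRange 0 ((width : Int) + 1) 1).foldl (pvStepB ops width digits)
      (0, none, [])).1

-- ===== PRECONDITION & SPEC =====
-- the maximal runs of non-blank columns (the problems), used by Pre_ (structural,
-- so that Pre_ is decidable by evaluation; cur accumulates the open run)
def pvRunsAux : List (List Char) → List (List Char) → List (List (List Char))
  | cur, [] => if cur.isEmpty then [] else [cur]
  | cur, c :: cs =>
    if pvBlank c then (if cur.isEmpty then pvRunsAux [] cs else cur :: pvRunsAux [] cs)
    else pvRunsAux (cur ++ [c]) cs

def pvProblemRuns (cols : List (List Char)) : List (List (List Char)) := pvRunsAux [] cols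

-- Pre_ excludes exactly the inputs where the Python A raises: no non-blank line at all
-- (IndexError at lines[-1]), a column whose stacked non-space characters are not a valid
-- int() literal (ValueError), or a problem whose operator characters strip to something
-- other than '+' or '*' (ValueError). B raises on exactly the same inputs.
def Pre_try_squid_math (lines : List String) : Prop :=
  let lns := pvLines lines
  let ops := (lns.getLast?).getD []
  let cols := pvCols lns.dropLast ops
  lns ≠ [] ∧
  (∀ col ∈ cols,
    col.dropLast.filter (fun d => !(d == ' ')) = [] ∨
    (PySem.Int.ofChars? (col.dropLast.filter (fun d => !(d == ' ')))).isSome) ∧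
  (∀ run ∈ pvProblemRuns cols,
    PySem.Chars.strip (run.map (fun col => (col.getLast?).getD ' ')) = ['+'] ∨
    PySem.Chars.strip (run.map (fun col => (col.getLast?).getD ' ')) = ['*'])

instance (lines : List String) : Decidable (Pre_try_squid_math lines) := by
  unfold Pre_try_squid_math; infer_instance

def pvWitness_try_squid_math : List String := ["1 2", "3 4", "+ *"]

def Spec_try_squid_math (lines : List String) (out : Int) : Prop := out = try_squid_math_alt lines
instance (lines : List String) (out : Int) : Decidable (Spec_try_squid_math lines out) := by unfold Spec_try_squid_math; infer_instance

-- ===== CLAIM (what is proved, stated in full; the proofs are below) =====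
def Claim_equal_try_squid_math : Prop := ∀ (lines : List String), Dom_try_squid_math lines → Pre_try_squid_math lines → Spec_try_squid_math lines (try_squid_math lines)

-- ===== LEMMAS AND PROOFS =====

-- takeWhile/dropWhile reference form of the runs (used only in the proofs)
def pvRunsRef (cols : List (List Char)) : List (List (List Char)) :=
  match cols with
  | [] => []
  | c :: cs =>
    if pvBlank c then pvRunsRef cs
    else (c :: cs.takeWhile (fun x => !pvBlank x)) ::
         pvRunsRef (cs.dropWhile (fun x => !pvBlank x))
  termination_by cols.length
  decreasing_by
    all_goals simp
    have := List.length_dropWhile_le (p := fun x => !pvBlank x) (l := cs); omega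

-- value of one problem run (shared reference form of both sides)
def pvOpChars (run : List (List Char)) : List Char :=
  run.map (fun col => (col.getLast?).getD ' ')

def pvNumsOf (run : List (List Char)) : List Int :=
  run.foldl
    (fun ns col =>
      let digits := col.dropLast.filter (fun d => !(d == ' '))
      if !digits.isEmpty then ns ++ [(PySem.Int.ofChars? digits).getD 0] else ns) []

def pvValOf (op : List Char) (ns : List Int) : Int :=
  if op == ['+'] then ns.sum
  else if op == ['*'] then ns.foldl (fun p n => p * n) 1
  else 0

def pvRunVal (run : List (List Char)) : Int :=
  pvValOf (PySem.Chars.strip (pvOpChars run)) (pvNumsOf run)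

-- ---- A-side reference lemmas (A = sum of pvRunVal over pvRunsRef) ----

-- Nat-level reference of A's problem_ranges
def pvRangesOf (i : Nat) (cols : List (List Char)) : List (Nat × Nat) :=
  match cols with
  | [] => []
  | c :: cs =>
    if pvBlank c then pvRangesOf (i + 1) cs
    else (i, i + 1 + (cs.takeWhile (fun x => !pvBlank x)).length) ::
         pvRangesOf (i + 1 + (cs.takeWhile (fun x => !pvBlank x)).length)
           (cs.dropWhile (fun x => !pvBlank x))
  termination_by cols.length
  decreasing_by
    all_goals simp
    have := List.length_dropWhile_le (p := fun x => !pvBlank x) (l := cs); omega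

-- the Int contributed by one problem range in A (0 for the raising branch)
def pvValA (nums : List (List Char)) (ops : List Char) (s e : Int) : Int :=
  let op := PySem.Chars.strip (PySem.List.slice ops (some s) (some e))
  let numbers := pvNumbersA (pvDigitsArr nums s e)
  if op == ['+'] then numbers.sum
  else if op == ['*'] then numbers.foldl (fun p n => p * n) 1
  else 0

-- the non-space characters stacked in column j (rows top to bottom)
def pvColDS (nums : List (List Char)) (j : Nat) : List Char :=
  (nums.map (fun r => r.getD j ' ')).filter (fun d => !(d == ' '))

def pvFlush (k : Int) (r : Bool × Int × List (Int × Int)) : List (Int × Int) :=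
  if r.1 then r.2.2 ++ [(r.2.1, k)] else r.2.2

def pvC2I (p : Nat × Nat) : Int × Int := ((p.1 : Int), (p.2 : Int))

theorem takeWhile_eq_take (p : List Char → Bool) : ∀ (l : List (List Char)),
    l.takeWhile p = l.take (l.takeWhile p).length ∧
    l.dropWhile p = l.drop (l.takeWhile p).length := by
  intro l; induction l with
  | nil => simp
  | cons a l ih =>
    by_cases h : p a
    · simp only [List.takeWhile_cons, List.dropWhile_cons, h, if_pos, List.length_cons,
        List.take_succ_cons, List.drop_succ_cons]
      exact ⟨by rw [← ih.1], by rw [← ih.2]⟩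
    · simp [h]

-- A's state machine plus the final flush computes pvRangesOf
theorem stateMachine_eq : ∀ (suffix : List (List Char)) (i : Nat) (rs : List (Int × Int)),
    (∀ b0 : Int,
      pvFlush ((i + suffix.length : Nat) : Int)
          ((PySem.List.enumerate suffix (i : Int)).foldl pvStep (false, b0, rs))
        = rs ++ (pvRangesOf i suffix).map pvC2I) ∧
    (∀ st : Int,
      pvFlush ((i + suffix.length : Nat) : Int)
          ((PySem.List.enumerate suffix (i : Int)).foldl pvStep (true, st, rs))
        = rs ++ (st, ((i + (suffix.takeWhile (fun x => !pvBlank x)).length : Nat) : Int)) ::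
            (pvRangesOf (i + (suffix.takeWhile (fun x => !pvBlank x)).length)
              (suffix.dropWhile (fun x => !pvBlank x))).map pvC2I) := by
  intro suffix
  induction suffix with
  | nil =>
    intro i rs
    exact ⟨fun b0 => by simp [PySem.List.enumerate, pvFlush, pvRangesOf],
           fun st => by simp [PySem.List.enumerate, pvFlush, pvRangesOf]⟩
  | cons c cs ih =>
    intro i rs
    have hcast : (i : Int) + 1 = ((i + 1 : Nat) : Int) := by push_cast; ring
    have hlen : i + (c :: cs).length = (i + 1) + cs.length := by simp; omega
    constructor
    · intro b0
      rw [PySem.List.enumerate_cons, List.foldl_cons, hcast, hlen]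
      by_cases hb : pvBlank c = true
      · rw [show pvStep (false, b0, rs) ((i : Int), c) = (false, b0, rs) by simp [pvStep, hb]]
        rw [(ih (i + 1) rs).1 b0]
        rw [show pvRangesOf i (c :: cs) = pvRangesOf (i + 1) cs by
          rw [pvRangesOf.eq_def]; simp [hb]]
      · rw [show pvStep (false, b0, rs) ((i : Int), c) = (true, (i : Int), rs) by simp [pvStep, hb]]
        rw [(ih (i + 1) rs).2 (i : Int)]
        rw [show pvRangesOf i (c :: cs)
            = (i, i + 1 + (cs.takeWhile (fun x => !pvBlank x)).length) ::
              pvRangesOf (i + 1 + (cs.takeWhile (fun x => !pvBlank x)).length)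
                (cs.dropWhile (fun x => !pvBlank x)) by
          rw [pvRangesOf.eq_def]; simp [hb]]
        simp [pvC2I]
    · intro st
      rw [PySem.List.enumerate_cons, List.foldl_cons, hcast, hlen]
      by_cases hb : pvBlank c = true
      · rw [show pvStep (true, st, rs) ((i : Int), c) = (false, 0, rs ++ [(st, (i : Int))]) by
          simp [pvStep, hb]]
        rw [(ih (i + 1) (rs ++ [(st, (i : Int))])).1 0]
        rw [List.takeWhile_cons_of_neg (by simp [hb]), List.dropWhile_cons_of_neg (by simp [hb])]
        simp only [List.length_nil, Nat.add_zero]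
        rw [show pvRangesOf i (c :: cs) = pvRangesOf (i + 1) cs by
          rw [pvRangesOf.eq_def]; simp [hb]]
        simp
      · rw [show pvStep (true, st, rs) ((i : Int), c) = (true, st, rs) by simp [pvStep, hb]]
        rw [(ih (i + 1) rs).2 st]
        rw [List.takeWhile_cons_of_pos (by simp [hb]), List.dropWhile_cons_of_pos (by simp [hb])]
        rw [show i + (c :: cs.takeWhile (fun x => !pvBlank x)).length
            = i + 1 + (cs.takeWhile (fun x => !pvBlank x)).length by simp; omega]

-- inner row loop of the scatter: appends exactly the column's non-space chars at idx
theorem modify_append_cons (l r : List (List Char)) (x : List Char) (f : List Char → List Char) :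
    (l ++ x :: r).modify l.length f = l ++ f x :: r := by
  rw [List.modify_eq_set_getElem?]
  simp [List.set_append_right]

theorem nd_inner (nums : List (List Char)) (col : Int) (idx : Nat) : ∀ (nd : List (List Char)),
    nums.foldl
      (fun nd row =>
        if PySem.List.pyGetD row col ' ' != ' ' then
          nd.modify idx (fun l => l ++ [PySem.List.pyGetD row col ' '])
        else nd) nd
    = nd.modify idx
        (fun l => l ++ (nums.map (fun r => PySem.List.pyGetD r col ' ')).filter
          (fun d => !(d == ' '))) := by
  induction nums with
  | nil =>
    intro nd
    simp only [List.foldl_nil, List.map_nil, List.filter_nil, List.append_nil]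
    conv_rhs => rw [show (fun l : List Char => l) = id from rfl, List.modify_id]
  | cons r rs ih =>
    intro nd
    rw [List.foldl_cons]
    by_cases h : (PySem.List.pyGetD r col ' ' != ' ') = true
    · rw [if_pos h, ih, List.modify_modify_eq]
      simp only [List.map_cons, List.filter_cons, bne] at h ⊢
      rw [h]
      congr 1
      funext l
      simp [Function.comp]
    · rw [if_neg h, ih]
      simp only [List.map_cons, List.filter_cons, bne] at h ⊢
      simp only [Bool.not_eq_true, Bool.not_eq_false'] at h
      rw [h]
      simp

theorem nd_outer (nums : List (List Char)) (s N : Nat) : ∀ (m : Nat), m ≤ N →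
    ∀ (pre : List (List Char)), pre.length = N - m →
    (PySem.List.pyRange ((s : Int) + (m : Int) - 1) ((s : Int) - 1) (-1)).foldl
      (fun nd col =>
        nums.foldl
          (fun nd row =>
            if PySem.List.pyGetD row col ' ' != ' ' then
              nd.modify (((s : Int) + (N : Int)) - 1 - col).toNat
                (fun l => l ++ [PySem.List.pyGetD row col ' '])
            else nd)
          nd)
      (pre ++ List.replicate m [])
    = pre ++ ((List.range' s m).reverse.map (pvColDS nums)) := by
  intro m
  induction m generalizing s with
  | zero =>
    intro _ pre _
    rw [PySem.List.pyRange_neg_one_eq_nil (by push_cast; omega)]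
    simp
  | succ m ih =>
    intro hm pre hpre
    rw [show (s : Int) + ((m + 1 : Nat) : Int) - 1 = (s : Int) + (m : Int) by push_cast; ring,
      PySem.List.pyRange_neg_one_cons (by omega), List.foldl_cons, nd_inner]
    rw [show ((s : Int) + (N : Int) - 1 - ((s : Int) + (m : Int))).toNat = pre.length by omega]
    rw [List.replicate_succ, modify_append_cons, List.nil_append]
    have hds : (nums.map (fun r => PySem.List.pyGetD r ((s : Int) + (m : Int)) ' ')).filter (fun d => !(d == ' ')) = pvColDS nums (s + m) := by
      unfold pvColDS
      rw [show (s : Int) + (m : Int) = ((s + m : Nat) : Int) by push_cast; ring]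
      simp only [PySem.List.pyGetD_natCast]
    rw [hds, show pre ++ pvColDS nums (s + m) :: List.replicate m [] = (pre ++ [pvColDS nums (s + m)]) ++ List.replicate m [] by simp]
    rw [ih s (by omega) (pre ++ [pvColDS nums (s + m)]) (by simp; omega)]
    rw [show List.range' s (m + 1) = List.range' s m ++ [s + m] by simpa using List.range'_concat (step := 1) (s := s) (n := m)]
    simp

theorem digitsArr_eq (nums : List (List Char)) (s n : Nat) :
    pvDigitsArr nums (s : Int) ((s : Int) + (n : Int))
      = (List.range' s n).reverse.map (pvColDS nums) := by
  unfold pvDigitsArr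
  rw [show ((s : Int) + (n : Int) - (s : Int)).toNat = n by omega]
  exact nd_outer nums s n n le_rfl [] (by simp)

theorem numbersA_eq (nd : List (List Char)) :
    pvNumbersA nd = (nd.filter (fun l => !l.isEmpty)).map
      (fun digits => (PySem.Int.ofChars? digits).getD 0) := by
  unfold pvNumbersA
  rw [PySem.List.foldl_append_if (fun digits => !digits.isEmpty)
    (fun digits => (PySem.Int.ofChars? digits).getD 0)]
  simp

theorem pvWidth_le_ops (nums : List (List Char)) (ops : List Char) :
    pvWidth nums ops ≤ ops.length := by
  unfold pvWidth
  generalize nums.map List.length = l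
  have : ∀ (l : List Nat) (a : Nat), l.foldl min a ≤ a := by
    intro l; induction l with
    | nil => simp
    | cons b l ih => intro a; exact le_trans (ih (min a b)) (min_le_left a b)
  exact this l ops.length

theorem cols_slice (nums : List (List Char)) (ops : List Char) (s n : Nat)
    (h : s + n ≤ (pvCols nums ops).length) :
    ((pvCols nums ops).drop s).take n
      = (List.range' s n).map (fun i => nums.map (fun r => r.getD i ' ') ++ [ops.getD i ' ']) := by
  have hw : (pvCols nums ops).length = pvWidth nums ops := by simp [pvCols]
  apply List.ext_getElem
  · simp only [List.length_take, List.length_drop, List.length_map, List.length_range']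
    omega
  · intro j h1 h2
    simp only [List.getElem_take, List.getElem_drop, pvCols, List.getElem_map,
      List.getElem_range, List.getElem_range', one_mul]

theorem ops_slice (ops : List Char) (s n : Nat) (h : s + n ≤ ops.length) :
    List.take n (List.drop s ops) = (List.range' s n).map (fun i => ops.getD i ' ') := by
  apply List.ext_getElem
  · simp only [List.length_take, List.length_drop, List.length_map, List.length_range']
    omega
  · intro j h1 h2
    simp only [List.getElem_take, List.getElem_drop, List.getElem_map, List.getElem_range']
    rw [List.getD_eq_getElem ops ' ' (by simp at h1 ⊢; omega)]
    congr 1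
    omega

-- one problem range of A has the value of the matching run
theorem valA_eq_runVal (nums : List (List Char)) (ops : List Char) (s n : Nat)
    (h : s + n ≤ (pvCols nums ops).length) :
    pvValA nums ops (s : Int) (((s + n : Nat)) : Int)
      = pvRunVal (((pvCols nums ops).drop s).take n) := by
  have hw : (pvCols nums ops).length = pvWidth nums ops := by simp [pvCols]
  have hops : s + n ≤ ops.length := le_trans (by omega) (pvWidth_le_ops nums ops)
  unfold pvValA pvRunVal pvValOf pvOpChars pvNumsOf
  rw [cols_slice nums ops s n h]
  rw [show ((s + n : Nat) : Int) = (s : Int) + (n : Int) by push_cast; ring]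
  rw [digitsArr_eq, numbersA_eq]
  have hop : PySem.List.slice ops (some (s : Int)) (some ((s : Int) + (n : Int))) =
      ((List.range' s n).map
        (fun i => nums.map (fun r => r.getD i ' ') ++ [ops.getD i ' '])).map
        (fun col => (col.getLast?).getD ' ') := by
    rw [show (s : Int) + (n : Int) = ((s + n : Nat) : Int) by push_cast; ring]
    rw [PySem.List.slice_natCast, show s + n - s = n by omega, ops_slice ops s n hops]
    simp [List.map_map, Function.comp]
  rw [hop]
  rw [PySem.List.foldl_append_if
    (fun col : List Char => !(col.dropLast.filter (fun d => !(d == ' '))).isEmpty)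
    (fun col : List Char => (PySem.Int.ofChars? (col.dropLast.filter (fun d => !(d == ' ')))).getD 0)]
  have key : ((((List.range' s n).reverse.map (pvColDS nums)).filter
        (fun l => !l.isEmpty)).map (fun digits => (PySem.Int.ofChars? digits).getD 0))
      = ((((List.range' s n).map
            (fun i => nums.map (fun r => r.getD i ' ') ++ [ops.getD i ' '])).filter
          (fun col => !(col.dropLast.filter (fun d => !(d == ' '))).isEmpty)).map
          (fun col => (PySem.Int.ofChars? (col.dropLast.filter (fun d => !(d == ' ')))).getD 0)).reverse := by
    rw [List.filter_map, List.filter_map, List.map_map, List.map_map]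
    simp only [Function.comp_def, List.dropLast_concat]
    rw [List.filter_reverse, List.map_reverse]
    simp only [pvColDS]
  rw [key]
  by_cases h1 : (PySem.Chars.strip
      (((List.range' s n).map
        (fun i => nums.map (fun r => r.getD i ' ') ++ [ops.getD i ' '])).map
        (fun col => (col.getLast?).getD ' ')) == ['+']) = true
  · rw [if_pos h1, if_pos h1, List.nil_append, List.sum_reverse]
  · rw [if_neg h1, if_neg h1]
    by_cases h2 : (PySem.Chars.strip
        (((List.range' s n).map
          (fun i => nums.map (fun r => r.getD i ' ') ++ [ops.getD i ' '])).map
          (fun col => (col.getLast?).getD ' ')) == ['*']) = true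
    · rw [if_pos h2, if_pos h2, List.nil_append, ← List.prod_eq_foldl, ← List.prod_eq_foldl,
        List.prod_reverse]
    · rw [if_neg h2, if_neg h2]

theorem answers_sum (nums : List (List Char)) (ops : List Char) :
    ∀ (rl : List (Int × Int)) (acc : List Int),
    (rl.foldl
      (fun acc se =>
        let op := PySem.Chars.strip (PySem.List.slice ops (some se.1) (some se.2))
        let numbers := pvNumbersA (pvDigitsArr nums se.1 se.2)
        if op == ['+'] then acc ++ [numbers.sum]
        else if op == ['*'] then acc ++ [numbers.foldl (fun p n => p * n) 1]
        else acc) acc).sum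
    = acc.sum + (rl.map (fun se => pvValA nums ops se.1 se.2)).sum := by
  intro rl
  induction rl with
  | nil => intro acc; simp
  | cons se rl ih =>
    intro acc
    rw [List.foldl_cons, List.map_cons, List.sum_cons, ih]
    simp only [pvValA]
    split_ifs with h1 h2 <;> simp [List.sum_append] <;> ring

theorem corr (nums : List (List Char)) (ops : List Char) :
    ∀ (L : Nat) (suffix : List (List Char)) (i : Nat), suffix.length = L →
    suffix = (pvCols nums ops).drop i →
    ((pvRangesOf i suffix).map (fun p => pvValA nums ops (p.1 : Int) (p.2 : Int))).sum
      = ((pvRunsRef suffix).map pvRunVal).sum := by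
  intro L
  induction L using Nat.strong_induction_on with
  | _ L ih =>
    intro suffix i hlen hsuf
    cases suffix with
    | nil => simp [pvRangesOf, pvRunsRef]
    | cons c cs =>
      have hcs : cs = (pvCols nums ops).drop (i + 1) := by
        have ht : ((pvCols nums ops).drop i).tail = (pvCols nums ops).drop (i + 1) :=
          List.tail_drop ..
        rw [← ht, ← hsuf]
        rfl
      have hslen : cs.length + 1 = (pvCols nums ops).length - i := by
        have := congrArg List.length hsuf
        simpa using this
      have hlt : i < (pvCols nums ops).length := by
        rcases Nat.lt_or_ge i (pvCols nums ops).length with hc | hc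
        · exact hc
        · rw [List.drop_eq_nil_of_le hc] at hsuf
          simp at hsuf
      by_cases hb : pvBlank c = true
      · rw [show pvRangesOf i (c :: cs) = pvRangesOf (i + 1) cs by
          rw [pvRangesOf.eq_def]; simp [hb]]
        rw [show pvRunsRef (c :: cs) = pvRunsRef cs by rw [pvRunsRef.eq_def]; simp [hb]]
        exact ih cs.length (by simp at hlen; omega) cs (i + 1) rfl hcs
      · rw [show pvRangesOf i (c :: cs)
            = (i, i + 1 + (cs.takeWhile (fun x => !pvBlank x)).length) ::
              pvRangesOf (i + 1 + (cs.takeWhile (fun x => !pvBlank x)).length)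
                (cs.dropWhile (fun x => !pvBlank x)) by
          rw [pvRangesOf.eq_def]; simp [hb]]
        rw [show pvRunsRef (c :: cs)
            = (c :: cs.takeWhile (fun x => !pvBlank x)) ::
              pvRunsRef (cs.dropWhile (fun x => !pvBlank x)) by
          rw [pvRunsRef.eq_def]; simp [hb]]
        rw [List.map_cons, List.map_cons, List.sum_cons, List.sum_cons]
        have hkle : (cs.takeWhile (fun x => !pvBlank x)).length ≤ cs.length :=
          (List.takeWhile_sublist (p := fun x => !pvBlank x) (l := cs)).length_le
        have hbound : i + ((cs.takeWhile (fun x => !pvBlank x)).length + 1)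
            ≤ (pvCols nums ops).length := by omega
        have hrun : ((pvCols nums ops).drop i).take
              ((cs.takeWhile (fun x => !pvBlank x)).length + 1)
            = c :: cs.takeWhile (fun x => !pvBlank x) := by
          rw [← hsuf, List.take_succ_cons, ← (takeWhile_eq_take (fun x => !pvBlank x) cs).1]
        have hdrop : cs.dropWhile (fun x => !pvBlank x)
            = (pvCols nums ops).drop (i + 1 + (cs.takeWhile (fun x => !pvBlank x)).length) := by
          have h2 : ∀ m, cs.drop m = (pvCols nums ops).drop (i + 1 + m) := by
            intro m
            rw [hcs, List.drop_drop]
          rw [(takeWhile_eq_take (fun x => !pvBlank x) cs).2, h2]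
        have hval := valA_eq_runVal nums ops i ((cs.takeWhile (fun x => !pvBlank x)).length + 1)
          hbound
        rw [hrun] at hval
        congr 1
        · rw [show i + 1 + (cs.takeWhile (fun x => !pvBlank x)).length
              = i + ((cs.takeWhile (fun x => !pvBlank x)).length + 1) by omega] at *
          exact hval
        · have hdlen := List.length_dropWhile_le (p := fun x => !pvBlank x) (l := cs)
          exact ih (cs.dropWhile (fun x => !pvBlank x)).length (by simp at hlen; omega)
            (cs.dropWhile (fun x => !pvBlank x))
            (i + 1 + (cs.takeWhile (fun x => !pvBlank x)).length) rfl hdrop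

theorem rangesA_eq (cols : List (List Char)) :
    (if ((PySem.List.enumerate cols).foldl pvStep (false, 0, [])).1 = true
     then ((PySem.List.enumerate cols).foldl pvStep (false, 0, [])).2.2
       ++ [(((PySem.List.enumerate cols).foldl pvStep (false, 0, [])).2.1, (cols.length : Int))]
     else ((PySem.List.enumerate cols).foldl pvStep (false, 0, [])).2.2)
    = (pvRangesOf 0 cols).map pvC2I := by
  have h := (stateMachine_eq cols 0 []).1 0
  simp only [pvFlush] at h
  simpa using h

-- ---- B-side lemmas ----

theorem widthB_eq (nums : List (List Char)) (ops : List Char) :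
    pvWidthB nums ops = pvWidth nums ops := by
  simp [pvWidthB, pvWidth, List.foldl_map]

theorem pvWidth_le_row (nums : List (List Char)) (ops : List Char) (r : List Char)
    (hr : r ∈ nums) : pvWidth nums ops ≤ r.length := by
  unfold pvWidth
  have hmem : r.length ∈ nums.map List.length := List.mem_map_of_mem hr
  generalize nums.map List.length = l at hmem
  have key : ∀ (l : List Nat) (a x : Nat), x ∈ l → l.foldl min a ≤ x := by
    intro l
    induction l with
    | nil => intro a x hx; simp at hx
    | cons b l ih =>
      intro a x hx
      rcases List.mem_cons.mp hx with h | h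
      · subst h
        have h1 : ∀ (l : List Nat) (a : Nat), l.foldl min a ≤ a := by
          intro l; induction l with
          | nil => simp
          | cons c l ih2 => intro a; exact le_trans (ih2 (min a c)) (min_le_left a c)
        exact le_trans (h1 l (min a x)) (min_le_right a x)
      · exact ih (min a b) x h
  exact key l ops.length r.length hmem

-- contribution of one (index, char) list to key j
def pvContrib (j : Int) (l : List (Int × Char)) : List Char :=
  (l.filter (fun p => p.1 == j && p.2 != ' ')).map (fun p => p.2)

theorem digits_inner_get? (j : Int) : ∀ (l : List (Int × Char)) (d : PySem.Dict Int (List Char)),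
    (l.foldl (fun d p => if p.2 != ' ' then d.insert p.1 (d.getD p.1 [] ++ [p.2]) else d) d).get? j
      = match d.get? j with
        | some s => some (s ++ pvContrib j l)
        | none => if (pvContrib j l).isEmpty then none else some (pvContrib j l) := by
  intro l
  induction l with
  | nil =>
    intro d
    cases hd : d.get? j <;> simp [pvContrib, hd]
  | cons p l ih =>
    intro d
    rw [List.foldl_cons]
    by_cases hp : (p.2 != ' ') = true
    · rw [if_pos hp, ih]
      by_cases hk : p.1 = j
      · subst hk
        rw [PySem.Dict.get?_insert_self]
        rw [show pvContrib p.1 (p :: l) = p.2 :: pvContrib p.1 l by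
          simp [pvContrib, hp]]
        rw [PySem.Dict.getD_eq_get?_getD]
        cases d.get? p.1 <;> simp
      · rw [PySem.Dict.get?_insert_of_ne (hne := Ne.symm hk)]
        rw [show pvContrib j (p :: l) = pvContrib j l by
          simp [pvContrib, List.filter_cons, show (p.1 == j) = false by simp [hk]]]
    · rw [if_neg hp, ih]
      rw [show pvContrib j (p :: l) = pvContrib j l by
        simp only [Bool.not_eq_true] at hp
        simp [pvContrib, hp]]

theorem contrib_enumerate (jn : Nat) : ∀ (l : List Char) (s : Nat),
    pvContrib (jn : Int) (PySem.List.enumerate l (s : Int))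
      = if s ≤ jn ∧ jn - s < l.length then
          (if l.getD (jn - s) ' ' != ' ' then [l.getD (jn - s) ' '] else [])
        else [] := by
  intro l
  induction l with
  | nil => intro s; simp [PySem.List.enumerate_nil, pvContrib]
  | cons c l ih =>
    intro s
    rw [PySem.List.enumerate_cons, show (s : Int) + 1 = ((s + 1 : Nat) : Int) by push_cast; ring]
    have hstep : pvContrib (jn : Int) (((s : Int), c) :: PySem.List.enumerate l ((s + 1 : Nat) : Int))
        = (if ((s : Int) == (jn : Int)) && (c != ' ') then [c] else [])
          ++ pvContrib (jn : Int) (PySem.List.enumerate l ((s + 1 : Nat) : Int)) := by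
      simp only [pvContrib, List.filter_cons]
      by_cases h : (((s : Int) == (jn : Int)) && (c != ' ')) = true
      · simp [h]
      · simp [h]
    rw [hstep, ih (s + 1)]
    by_cases hsj : s = jn
    · subst hsj
      simp only [beq_self_eq_true, Bool.true_and]
      have h1 : ¬ (s + 1 ≤ s ∧ s - (s + 1) < l.length) := by omega
      rw [if_neg h1, List.append_nil]
      have h2 : s ≤ s ∧ s - s < (c :: l).length := by simp
      rw [if_pos h2]
      simp
    · have hbe : ((s : Int) == (jn : Int)) = false := by
        simp only [beq_eq_false_iff_ne, ne_eq, Int.natCast_inj]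
        exact hsj
      rw [hbe, Bool.false_and, if_neg (by simp), List.nil_append]
      by_cases hc : s + 1 ≤ jn ∧ jn - (s + 1) < l.length
      · have h3 : s ≤ jn ∧ jn - s < (c :: l).length := ⟨by omega, by simp; omega⟩
        rw [if_pos hc, if_pos h3]
        have h4 : jn - s = (jn - (s + 1)) + 1 := by omega
        rw [h4, List.getD_cons_succ]
      · have h3 : ¬ (s ≤ jn ∧ jn - s < (c :: l).length) := by simp; omega
        rw [if_neg hc, if_neg h3]

theorem digits_outer_get? (width : Nat) (j : Int) :
    ∀ (rows : List (List Char)) (d : PySem.Dict Int (List Char)),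
    ((rows.foldl
      (fun d row =>
        (PySem.List.enumerate (row.take width)).foldl
          (fun d p => if p.2 != ' ' then d.insert p.1 (d.getD p.1 [] ++ [p.2]) else d) d) d).get? j)
      = (let flat := (rows.map
            (fun r => pvContrib j (PySem.List.enumerate (r.take width)))).flatten
         match d.get? j with
         | some s => some (s ++ flat)
         | none => if flat.isEmpty then none else some flat) := by
  intro rows
  induction rows with
  | nil =>
    intro d
    cases hd : d.get? j <;> simp [hd]
  | cons r rows ih =>
    intro d
    rw [List.foldl_cons, ih]
    simp only [List.map_cons, List.flatten_cons]
    rw [digits_inner_get?]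
    cases hd : d.get? j with
    | some s => simp [List.append_assoc]
    | none =>
      by_cases hc : (pvContrib j (PySem.List.enumerate (r.take width))).isEmpty = true
      · rw [if_pos hc]
        rw [List.isEmpty_iff] at hc
        simp [hc]
      · rw [if_neg hc]
        rw [Bool.not_eq_true, List.isEmpty_eq_false_iff] at hc
        simp [hc]

theorem flatten_if (jn : Nat) : ∀ (rows : List (List Char)),
    (rows.map (fun r => if r.getD jn ' ' != ' ' then [r.getD jn ' '] else [])).flatten
      = (rows.map (fun r => r.getD jn ' ')).filter (fun d => !(d == ' ')) := by
  intro rows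
  induction rows with
  | nil => simp
  | cons r rows ih =>
    simp only [List.map_cons, List.flatten_cons, List.filter_cons, ih]
    split_ifs with h <;> simp_all

theorem digitsB_get? (nums : List (List Char)) (ops : List Char) (jn : Nat)
    (hj : jn < pvWidth nums ops) :
    (pvDigitsB nums (pvWidth nums ops)).get? (jn : Int)
      = if (pvColDS nums jn).isEmpty then none else some (pvColDS nums jn) := by
  unfold pvDigitsB
  rw [digits_outer_get?]
  simp only [PySem.Dict.get?_empty]
  have hrow : ∀ r ∈ nums,
      pvContrib (jn : Int) (PySem.List.enumerate (r.take (pvWidth nums ops)))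
        = if r.getD jn ' ' != ' ' then [r.getD jn ' '] else [] := by
    intro r hr
    have hle := pvWidth_le_row nums ops r hr
    have h0 : PySem.List.enumerate (r.take (pvWidth nums ops))
        = PySem.List.enumerate (r.take (pvWidth nums ops)) ((0 : Nat) : Int) := by norm_num
    rw [h0, contrib_enumerate]
    rw [if_pos (by refine ⟨Nat.zero_le _, ?_⟩; simp; omega)]
    have hgd : (r.take (pvWidth nums ops)).getD (jn - 0) ' ' = r.getD jn ' ' := by
      simp only [Nat.sub_zero]
      rw [List.getD_eq_getElem _ _ (by simp; omega), List.getD_eq_getElem _ _ (by omega),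
        List.getElem_take]
    rw [hgd]
  have hflat : (nums.map
      (fun r => pvContrib (jn : Int) (PySem.List.enumerate (r.take (pvWidth nums ops))))).flatten
      = pvColDS nums jn := by
    rw [List.map_congr_left hrow, flatten_if]
    rfl
  rw [hflat]

theorem digitsB_contains (nums : List (List Char)) (ops : List Char) (jn : Nat)
    (hj : jn < pvWidth nums ops) :
    (pvDigitsB nums (pvWidth nums ops)).contains (jn : Int) = !(pvColDS nums jn).isEmpty := by
  rw [PySem.Dict.contains_eq_isSome_get?, digitsB_get? nums ops jn hj]
  by_cases h : (pvColDS nums jn).isEmpty = true <;> simp [h]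

theorem digitsB_getD (nums : List (List Char)) (ops : List Char) (jn : Nat)
    (hj : jn < pvWidth nums ops) (hne : (pvColDS nums jn).isEmpty = false) :
    (pvDigitsB nums (pvWidth nums ops)).getD (jn : Int) [] = pvColDS nums jn := by
  rw [PySem.Dict.getD_eq_get?_getD, digitsB_get? nums ops jn hj, hne]
  simp

-- the j-th column of pvCols
theorem pvCols_getElem (nums : List (List Char)) (ops : List Char) (i : Nat)
    (h : i < (pvCols nums ops).length) :
    (pvCols nums ops)[i] = nums.map (fun r => r.getD i ' ') ++ [ops.getD i ' '] := by
  simp [pvCols]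

theorem length_pvCols (nums : List (List Char)) (ops : List Char) :
    (pvCols nums ops).length = pvWidth nums ops := by simp [pvCols]

-- B's blank test at column i < width is A's pvBlank of that column
theorem blank_bridge (nums : List (List Char)) (ops : List Char) (i : Nat)
    (hi : i < pvWidth nums ops) :
    (((i : Int) == ((pvWidth nums ops : Nat) : Int))
      || (PySem.List.pyGetD ops (i : Int) ' ' == ' '
          && !((pvDigitsB nums (pvWidth nums ops)).contains (i : Int))))
    = pvBlank (nums.map (fun r => r.getD i ' ') ++ [ops.getD i ' ']) := by
  have h1 : ((i : Int) == ((pvWidth nums ops : Nat) : Int)) = false := by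
    simp only [beq_eq_false_iff_ne, ne_eq, Int.natCast_inj]
    omega
  rw [h1, Bool.false_or, PySem.List.pyGetD_natCast, digitsB_contains nums ops i hi,
    Bool.not_not]
  unfold pvBlank pvColDS
  rw [List.all_append]
  simp only [List.all_cons, List.all_nil, Bool.and_true]
  rw [Bool.and_comm]
  congr 1
  cases hall : (nums.map (fun r => r.getD i ' ')).all (fun c => c == ' ') with
  | true =>
    have hnil : (nums.map (fun r => r.getD i ' ')).filter (fun d => !(d == ' ')) = [] := by
      rw [List.filter_eq_nil_iff]
      intro a ha
      have := List.all_eq_true.mp hall a ha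
      simp_all
    simp only [hnil, List.isEmpty_nil]
  | false =>
    rw [List.all_eq_false] at hall
    obtain ⟨a, ha, hna⟩ := hall
    have hmem : a ∈ (nums.map (fun r => r.getD i ' ')).filter (fun d => !(d == ' ')) :=
      List.mem_filter.mpr ⟨ha, by simpa using hna⟩
    rw [List.isEmpty_eq_false_iff]
    intro h0
    rw [h0] at hmem
    simp at hmem

-- pvNumsOf from a running accumulator
theorem numsOf_from (run : List (List Char)) (acc : List Int) :
    run.foldl
      (fun ns col =>
        let digits := col.dropLast.filter (fun d => !(d == ' '))
        if !digits.isEmpty then ns ++ [(PySem.Int.ofChars? digits).getD 0] else ns) acc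
    = acc ++ pvNumsOf run := by
  unfold pvNumsOf
  rw [PySem.List.foldl_append_if
    (fun col : List Char => !(col.dropLast.filter (fun d => !(d == ' '))).isEmpty)
    (fun col : List Char => (PySem.Int.ofChars? (col.dropLast.filter (fun d => !(d == ' ')))).getD 0)]
  rw [PySem.List.foldl_append_if
    (fun col : List Char => !(col.dropLast.filter (fun d => !(d == ' '))).isEmpty)
    (fun col : List Char => (PySem.Int.ofChars? (col.dropLast.filter (fun d => !(d == ' ')))).getD 0)]
  simp

-- B's per-column number contribution equals pvNumsOf of that single column
theorem col_contrib (nums : List (List Char)) (ops : List Char) (i : Nat)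
    (hi : i < pvWidth nums ops) :
    (if (pvDigitsB nums (pvWidth nums ops)).contains (i : Int) then
        ([] : List Int) ++ [(PySem.Int.ofChars?
          ((pvDigitsB nums (pvWidth nums ops)).getD (i : Int) [])).getD 0]
      else [])
    = pvNumsOf [nums.map (fun r => r.getD i ' ') ++ [ops.getD i ' ']] := by
  rw [digitsB_contains nums ops i hi]
  unfold pvNumsOf
  simp only [List.foldl_cons, List.foldl_nil, List.dropLast_concat]
  by_cases h : (pvColDS nums i).isEmpty = true
  · rw [show ((nums.map (fun r => r.getD i ' ')).filter (fun d => !(d == ' '))) = pvColDS nums i from rfl]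
    simp [h]
  · rw [Bool.not_eq_true] at h
    rw [show ((nums.map (fun r => r.getD i ' ')).filter (fun d => !(d == ' '))) = pvColDS nums i from rfl]
    rw [digitsB_getD nums ops i hi h]

-- the flush branch of pvStepB computes pvValOf
theorem flush_eq (ops : List Char) (width : Nat) (digits : PySem.Dict Int (List Char))
    (t : Int) (ns : List Int) (rop : List Char) (j : Int)
    (hb : (j == (width : Int)
      || (PySem.List.pyGetD ops j ' ' == ' ' && !(digits.contains j))) = true) :
    pvStepB ops width digits (t, some ns, rop) j
      = (t + pvValOf (PySem.Chars.strip rop) ns, none, []) := by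
  unfold pvStepB pvValOf
  rw [if_pos hb]
  by_cases h1 : (PySem.Chars.strip rop == ['+']) = true
  · simp [h1]
  · by_cases h2 : (PySem.Chars.strip rop == ['*']) = true
    · simp [h1, h2]
    · simp [h1, h2]

-- main invariant of B's fused pass
theorem loopB (nums : List (List Char)) (ops : List Char) :
    ∀ (suffix : List (List Char)) (i : Nat), i ≤ pvWidth nums ops →
    suffix = (pvCols nums ops).drop i →
    (∀ t : Int,
      (PySem.List.pyRange (i : Int) (((pvWidth nums ops : Nat) : Int) + 1) 1).foldl
        (pvStepB ops (pvWidth nums ops) (pvDigitsB nums (pvWidth nums ops)))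
        (t, none, ([] : List Char))
      = (t + ((pvRunsRef suffix).map pvRunVal).sum, none, []))
    ∧ (∀ (t : Int) (ns : List Int) (rop : List Char),
      (PySem.List.pyRange (i : Int) (((pvWidth nums ops : Nat) : Int) + 1) 1).foldl
        (pvStepB ops (pvWidth nums ops) (pvDigitsB nums (pvWidth nums ops)))
        (t, some ns, rop)
      = (t + pvValOf
            (PySem.Chars.strip (rop ++ pvOpChars (suffix.takeWhile (fun x => !pvBlank x))))
            (ns ++ pvNumsOf (suffix.takeWhile (fun x => !pvBlank x)))
          + ((pvRunsRef (suffix.dropWhile (fun x => !pvBlank x))).map pvRunVal).sum,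
         none, [])) := by
  intro suffix
  induction suffix with
  | nil =>
    intro i hi hsuf
    have hiW : i = pvWidth nums ops := by
      have := congrArg List.length hsuf
      simp [length_pvCols] at this
      omega
    subst hiW
    have hrange : PySem.List.pyRange ((pvWidth nums ops : Nat) : Int)
        (((pvWidth nums ops : Nat) : Int) + 1) 1
        = [((pvWidth nums ops : Nat) : Int)] := by
      rw [PySem.List.pyRange_one_cons (by omega), PySem.List.pyRange_one_eq_nil (by omega)]
    constructor
    · intro t
      rw [hrange, List.foldl_cons, List.foldl_nil]
      unfold pvStepB
      rw [if_pos (by simp)]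
      simp [pvRunsRef]
    · intro t ns rop
      rw [hrange, List.foldl_cons, List.foldl_nil, flush_eq _ _ _ _ _ _ _ (by simp)]
      simp [pvRunsRef, pvOpChars, pvNumsOf]
  | cons c cs ih =>
    intro i hi hsuf
    have hlt : i < pvWidth nums ops := by
      rcases Nat.lt_or_ge i (pvWidth nums ops) with hc | hc
      · exact hc
      · rw [List.drop_eq_nil_of_le (by rw [length_pvCols]; omega)] at hsuf
        simp at hsuf
    have hd : (pvCols nums ops).drop i
        = ((pvCols nums ops)[i]'(by rw [length_pvCols]; omega)) :: (pvCols nums ops).drop (i + 1) :=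
      List.drop_eq_getElem_cons (by rw [length_pvCols]; omega)
    rw [hd] at hsuf
    obtain ⟨hc1, hcs⟩ := List.cons_eq_cons.mp hsuf
    have hcol : c = nums.map (fun r => r.getD i ' ') ++ [ops.getD i ' '] := by
      rw [hc1, pvCols_getElem]
    have hrange : PySem.List.pyRange (i : Int) (((pvWidth nums ops : Nat) : Int) + 1) 1
        = (i : Int) :: PySem.List.pyRange (((i + 1 : Nat) : Nat) : Int)
            (((pvWidth nums ops : Nat) : Int) + 1) 1 := by
      rw [PySem.List.pyRange_one_cons (by push_cast; omega)]
      norm_num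
    have hbr := blank_bridge nums ops i hlt
    rw [← hcol] at hbr
    have ihP := (ih (i + 1) (by omega) hcs).1
    have ihQ := (ih (i + 1) (by omega) hcs).2
    by_cases hb : pvBlank c = true
    · -- blank column
      have hbt : (((i : Int) == ((pvWidth nums ops : Nat) : Int))
          || (PySem.List.pyGetD ops (i : Int) ' ' == ' '
              && !((pvDigitsB nums (pvWidth nums ops)).contains (i : Int)))) = true := by
        rw [hbr]; exact hb
      constructor
      · intro t
        rw [hrange, List.foldl_cons]
        rw [show pvStepB ops (pvWidth nums ops) (pvDigitsB nums (pvWidth nums ops))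
            (t, none, []) (i : Int) = (t, none, []) by unfold pvStepB; rw [if_pos hbt]]
        rw [ihP t]
        rw [show pvRunsRef (c :: cs) = pvRunsRef cs by
          rw [pvRunsRef.eq_def]; simp [hb]]
      · intro t ns rop
        rw [hrange, List.foldl_cons, flush_eq _ _ _ _ _ _ _ hbt, ihP]
        rw [List.takeWhile_cons_of_neg (by simp [hb]), List.dropWhile_cons_of_neg (by simp [hb])]
        rw [show pvRunsRef (c :: cs) = pvRunsRef cs by
          rw [pvRunsRef.eq_def]; simp [hb]]
        simp only [pvOpChars, pvNumsOf, List.map_nil, List.append_nil, List.foldl_nil]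
    · -- non-blank column
      have hbt : (((i : Int) == ((pvWidth nums ops : Nat) : Int))
          || (PySem.List.pyGetD ops (i : Int) ' ' == ' '
              && !((pvDigitsB nums (pvWidth nums ops)).contains (i : Int)))) = false := by
        rw [hbr]; simpa using hb
      have hlast : (c.getLast?).getD ' ' = ops.getD i ' ' := by
        rw [hcol]; simp
      have hop : PySem.List.pyGetD ops (i : Int) ' ' = ops.getD i ' ' :=
        PySem.List.pyGetD_natCast ..
      have hns1 := col_contrib nums ops i hlt
      rw [← hcol] at hns1
      have hruns : pvRunsRef (c :: cs)
          = (c :: cs.takeWhile (fun x => !pvBlank x)) ::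
            pvRunsRef (cs.dropWhile (fun x => !pvBlank x)) := by
        rw [pvRunsRef.eq_def]; simp [hb]
      have htw : (c :: cs).takeWhile (fun x => !pvBlank x)
          = c :: cs.takeWhile (fun x => !pvBlank x) :=
        List.takeWhile_cons_of_pos (by simp [hb])
      have hdw : (c :: cs).dropWhile (fun x => !pvBlank x)
          = cs.dropWhile (fun x => !pvBlank x) :=
        List.dropWhile_cons_of_pos (by simp [hb])
      have hnumsCons : ∀ tl, pvNumsOf (c :: tl) = pvNumsOf [c] ++ pvNumsOf tl := by
        intro tl
        unfold pvNumsOf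
        rw [List.foldl_cons, List.foldl_cons, List.foldl_nil]
        exact numsOf_from tl _
      have hopsCons : ∀ tl, pvOpChars (c :: tl) = ops.getD i ' ' :: pvOpChars tl := by
        intro tl
        unfold pvOpChars
        rw [List.map_cons, hlast]
      constructor
      · intro t
        rw [hrange, List.foldl_cons]
        rw [show pvStepB ops (pvWidth nums ops) (pvDigitsB nums (pvWidth nums ops))
            (t, none, []) (i : Int)
            = (t, some (pvNumsOf [c]), [ops.getD i ' ']) by
          unfold pvStepB
          rw [if_neg (ne_true_of_eq_false hbt)]
          simp only [hop]
          rw [show ((none : Option (List Int)).getD []) = ([] : List Int) from rfl] at *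
          exact congrArg (fun x => ((t : Int), some x, ([] : List Char) ++ [ops.getD i ' '])) hns1]
        rw [ihQ t (pvNumsOf [c]) [ops.getD i ' ']]
        rw [hruns, List.map_cons, List.sum_cons]
        unfold pvRunVal
        rw [show pvOpChars (c :: cs.takeWhile (fun x => !pvBlank x))
            = ops.getD i ' ' :: pvOpChars (cs.takeWhile (fun x => !pvBlank x)) from hopsCons _,
          show pvNumsOf (c :: cs.takeWhile (fun x => !pvBlank x))
            = pvNumsOf [c] ++ pvNumsOf (cs.takeWhile (fun x => !pvBlank x)) from hnumsCons _]
        simp only [List.singleton_append]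
        ring_nf
      · intro t ns rop
        rw [hrange, List.foldl_cons]
        rw [show pvStepB ops (pvWidth nums ops) (pvDigitsB nums (pvWidth nums ops))
            (t, some ns, rop) (i : Int)
            = (t, some (ns ++ pvNumsOf [c]), rop ++ [ops.getD i ' ']) by
          unfold pvStepB
          rw [if_neg (ne_true_of_eq_false hbt)]
          simp only [hop]
          rw [show ((some ns : Option (List Int)).getD []) = ns from rfl] at *
          refine congrArg (fun x => ((t : Int), some x, rop ++ [ops.getD i ' '])) ?_
          rw [← hns1]
          split_ifs with h
          · simp
          · simp]
        rw [ihQ t (ns ++ pvNumsOf [c]) (rop ++ [ops.getD i ' '])]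
        rw [htw, hdw,
          show pvOpChars (c :: cs.takeWhile (fun x => !pvBlank x))
            = ops.getD i ' ' :: pvOpChars (cs.takeWhile (fun x => !pvBlank x)) from hopsCons _,
          show pvNumsOf (c :: cs.takeWhile (fun x => !pvBlank x))
            = pvNumsOf [c] ++ pvNumsOf (cs.takeWhile (fun x => !pvBlank x)) from hnumsCons _]
        simp [List.append_assoc]

-- B equals the run-sum reference
theorem altB_eq (lines : List String) :
    try_squid_math_alt lines
      = match (pvLines lines).getLast? with
        | none => 0
        | some ops =>
          ((pvRunsRef (pvCols (pvLines lines).dropLast ops)).map pvRunVal).sum := by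
  unfold try_squid_math_alt
  cases hl : (pvLines lines).getLast? with
  | none => simp [hl]
  | some ops =>
    simp only [hl]
    rw [widthB_eq]
    have h := (loopB (pvLines lines).dropLast ops (pvCols (pvLines lines).dropLast ops) 0
      (by omega) (by simp)).1 0
    rw [show ((0 : Nat) : Int) = (0 : Int) by norm_num] at h
    rw [h]
    simp

-- ===== VERDICT (by name: the statement is the Claim_ definition above) =====
theorem try_squid_math_spec : Claim_equal_try_squid_math := by
  intro lines _ _
  unfold Spec_try_squid_math
  rw [altB_eq]
  simp only [try_squid_math]
  cases hl : (pvLines lines).getLast? with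
  | none => simp
  | some ops =>
    simp only [hl]
    rw [rangesA_eq]
    rw [answers_sum]
    rw [List.map_map]
    rw [show ((fun se : Int × Int => pvValA ((pvLines lines).dropLast) ops se.1 se.2) ∘ pvC2I)
        = (fun p : Nat × Nat => pvValA ((pvLines lines).dropLast) ops (p.1 : Int) (p.2 : Int)) by
      funext p; simp [pvC2I]]
    rw [corr ((pvLines lines).dropLast) ops
      (pvCols ((pvLines lines).dropLast) ops).length
      (pvCols ((pvLines lines).dropLast) ops) 0 rfl (by simp)]
    simp
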